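-- pv_equiv track=rewrite | github.com/amrhas82/aurora | packages/soar/src/aurora_soar/headless/prompt_loader.py | _parse_list_items
-- ===== SOURCE A (Python) =====
-- from typing import Any, Dict, List, Optional
--
-- def _parse_list_items(content: str) -> List[str]:
--     """
--     Parse markdown list items from content.
--
--     Supports both "- item" and "* item" formats.
--
--     Args:
--         content: Section content with list items
--
--     Returns:
--         List of parsed items (without bullets, trimmed)
--     """
--     items = []
--     for line in content.split("\n"):
--         line = line.strip()
--         # Match "- item" or "* item"
--         if line.startswith("- ") or line.startswith("* "):
--             item = line[2:].strip()
--             if item:  # Skip empty items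
--                 items.append(item)
--     return items
-- ===== SOURCE B (Python) =====
-- from typing import List
--
-- def _parse_list_items(content: str) -> List[str]:
--     """Single-pass character state machine: no split/strip/startswith per line."""
--     items: List[str] = []
--     buf: List[str] = []
--     mode = 0  # 0 line start (skip ws), 1 saw bullet, 2 before item (skip ws), 3 in item, 4 skip rest of line
--     for ch in content + "\n":
--         if ch == "\n":
--             if mode == 3:
--                 items.append("".join(buf).rstrip())
--             buf = []
--             mode = 0
--         elif mode == 0:
--             if ch in " \t\r":
--                 pass
--             elif ch in "-*":
--                 mode = 1
--             else:
--                 mode = 4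
--         elif mode == 1:
--             mode = 2 if ch == " " else 4
--         elif mode == 2:
--             if ch not in " \t\r":
--                 buf.append(ch)
--                 mode = 3
--         elif mode == 3:
--             buf.append(ch)
--     return items
-- ===== Notes on version B (the rewrite author's own statement) =====
-- stated objective: alternative
-- what changed: Replaced the split-lines/strip/startswith line loop by a single left-to-right character scan with an explicit 5-state machine that emits each item when its line's newline is reached.
import Mathlib
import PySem

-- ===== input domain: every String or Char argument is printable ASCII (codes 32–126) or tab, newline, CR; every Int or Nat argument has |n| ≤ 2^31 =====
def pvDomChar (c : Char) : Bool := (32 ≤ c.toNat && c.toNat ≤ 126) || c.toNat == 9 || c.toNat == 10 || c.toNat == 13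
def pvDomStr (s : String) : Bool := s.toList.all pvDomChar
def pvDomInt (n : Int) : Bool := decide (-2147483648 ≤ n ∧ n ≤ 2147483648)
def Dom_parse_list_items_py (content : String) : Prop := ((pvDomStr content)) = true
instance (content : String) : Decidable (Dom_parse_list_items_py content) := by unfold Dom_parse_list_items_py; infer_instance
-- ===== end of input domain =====

-- B replaces A's split-lines/strip/startswith loop by one character-level scan with an explicit
-- 5-state machine (objective: alternative — same O(n) cost, genuinely different traversal).

-- ===== PORT A =====
-- one line-loop body of A; content.split("\n") has a non-empty separator so it never raises:
-- PySem.Str.split? content "\n" = some ((PySem.Chars.splitOn content.toList ['\n']).map String.ofList),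
-- ported through that value directly.
def pvALine (items : List String) (line : String) : List String :=
  let line := PySem.Str.strip line
  if PySem.Str.startswith line "- " || PySem.Str.startswith line "* " then
    let item := PySem.Str.strip (PySem.Str.slice line (some 2) none)
    if item ≠ "" then items ++ [item] else items
  else items

def parse_list_items_py (content : String) : List String :=
  ((PySem.Chars.splitOn content.toList ['\n']).map String.ofList).foldl pvALine []

-- ===== PORT B =====
-- the state machine step of Source B: state = (mode, buf, items)
def pvBStep (st : Nat × List Char × List String) (ch : Char) : Nat × List Char × List String :=
  match st with
  | (mode, buf, items) =>
    if ch = '\n' then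
      if mode = 3 then (0, [], items ++ [String.ofList (PySem.Chars.rstrip buf)])
      else (0, [], items)
    else if mode = 0 then
      if ch = ' ' ∨ ch = '\t' ∨ ch = '\r' then (0, buf, items)
      else if ch = '-' ∨ ch = '*' then (1, buf, items)
      else (4, buf, items)
    else if mode = 1 then
      if ch = ' ' then (2, buf, items) else (4, buf, items)
    else if mode = 2 then
      if ch = ' ' ∨ ch = '\t' ∨ ch = '\r' then (2, buf, items)
      else (3, [ch], items)
    else if mode = 3 then (3, buf ++ [ch], items)
    else (4, buf, items)

def parse_list_items_py_alt (content : String) : List String :=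
  ((content.toList ++ ['\n']).foldl pvBStep (0, [], [])).2.2

-- ===== PRECONDITION & SPEC =====
def Spec_parse_list_items_py (content : String) (out : List String) : Prop := out = parse_list_items_py_alt content
instance (content : String) (out : List String) : Decidable (Spec_parse_list_items_py content out) := by unfold Spec_parse_list_items_py; infer_instance

-- ===== CLAIM (what is proved, stated in full; the proofs are below) =====
def Claim_equal_parse_list_items_py : Prop := ∀ (content : String), Dom_parse_list_items_py content → Spec_parse_list_items_py content (parse_list_items_py content)

-- ===== LEMMAS AND PROOFS =====

-- the whitespace characters a Dom line can contain (Python str.strip's set restricted to Dom minus '\n')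
def pvW (c : Char) : Bool := c = ' ' || c = '\t' || c = '\r'

-- trailing-whitespace trim with pvW
def pvRstrip (l : List Char) : List Char := (l.reverse.dropWhile pvW).reverse

-- reference line split on '\n'
def pvLines : List Char → List (List Char)
  | [] => [[]]
  | c :: rest =>
    if c = '\n' then [] :: pvLines rest
    else
      match pvLines rest with
      | [] => [[c]]
      | l :: ls => (c :: l) :: ls

-- what A contributes per line, on the char level
def pvAContrib (l : List Char) : List String :=
  let t := PySem.Chars.strip l
  if PySem.Chars.startswith t ['-', ' '] || PySem.Chars.startswith t ['*', ' '] then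
    let item := PySem.Chars.strip (PySem.Chars.slice t (some 2) none)
    if item ≠ [] then [String.ofList item] else []
  else []

-- what B contributes per line
def pvBContrib (l : List Char) : List String :=
  match l.dropWhile pvW with
  | [] => []
  | b :: u =>
    if b = '-' ∨ b = '*' then
      match u with
      | [] => []
      | x :: v =>
        if x = ' ' then
          match v.dropWhile pvW with
          | [] => []
          | c :: r => [String.ofList (PySem.Chars.rstrip (c :: r))]
        else []
    else []

theorem pvLines_ne_nil (cs : List Char) : pvLines cs ≠ [] := by
  induction cs with
  | nil => simp [pvLines]
  | cons c rest ih =>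
    simp only [pvLines]
    split
    · simp
    · cases h : pvLines rest with
      | nil => simp
      | cons l ls => simp

theorem pvModifyHead_nil_append (ls : List (List Char)) :
    ls.modifyHead (fun t => [] ++ t) = ls := by
  cases ls <;> simp

theorem pvSplitOn_go_eq (fuel : Nat) (l cur : List Char) (acc : List (List Char))
    (h : l.length ≤ fuel) :
    PySem.Chars.splitOn.go ['\n'] fuel l cur acc
      = acc.reverse ++ (pvLines l).modifyHead (cur.reverse ++ ·) := by
  induction fuel generalizing l cur acc with
  | zero =>
    have hl : l = [] := List.length_eq_zero_iff.mp (Nat.le_zero.mp h)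
    subst hl
    simp [PySem.Chars.splitOn.go, pvLines]
  | succ fuel ih =>
    cases l with
    | nil =>
      rw [PySem.Chars.splitOn.go]
      · simp [pvLines]
      · omega
    | cons c rest =>
      rw [PySem.Chars.splitOn.go]
      by_cases hc : c = '\n'
      · subst hc
        have hp : List.isPrefixOf ['\n'] ('\n' :: rest) = true := by
          simp [List.isPrefixOf]
        rw [if_pos hp]
        simp only [List.length_cons] at h
        have hdrop : List.drop (['\n'] : List Char).length ('\n' :: rest) = rest := by simp
        rw [hdrop, ih rest [] (List.reverse cur :: acc) (by omega)]
        simp only [pvLines, List.reverse_nil]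
        rw [pvModifyHead_nil_append]
        simp [List.modifyHead]
      · have hp : List.isPrefixOf ['\n'] (c :: rest) = false := by
          simp only [List.isPrefixOf, Bool.and_eq_false_iff, beq_eq_false_iff_ne, ne_eq]
          exact Or.inl fun he => hc he.symm
        rw [if_neg (by simp [hp])]
        simp only [List.length_cons] at h
        rw [ih rest (c :: cur) acc (by omega)]
        simp only [pvLines, if_neg hc]
        cases hpl : pvLines rest with
        | nil => exact absurd hpl (pvLines_ne_nil rest)
        | cons l0 ls => simp [List.modifyHead]

theorem pvSplitOn_eq (cs : List Char) : PySem.Chars.splitOn cs ['\n'] = pvLines cs := by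
  unfold PySem.Chars.splitOn
  rw [pvSplitOn_go_eq (cs.length + 1) cs [] [] (by omega)]
  simp only [List.reverse_nil, List.nil_append]
  exact pvModifyHead_nil_append (pvLines cs)

theorem pvLines_mem (cs : List Char) (l : List Char) (hl : l ∈ pvLines cs) :
    ∀ c ∈ l, c ∈ cs ∧ c ≠ '\n' := by
  induction cs generalizing l with
  | nil => simp [pvLines] at hl; simp [hl]
  | cons c rest ih =>
    simp only [pvLines] at hl
    by_cases hc : c = '\n'
    · simp [hc] at hl
      rcases hl with h | h
      · simp [h]
      · intro d hd
        rcases ih l h d hd with ⟨h1, h2⟩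
        exact ⟨by simp [h1], h2⟩
    · simp [hc] at hl
      cases h : pvLines rest with
      | nil => exact absurd h (pvLines_ne_nil rest)
      | cons l0 ls =>
        rw [h] at hl
        simp at hl
        rcases hl with h' | h'
        · subst h'
          intro d hd
          rcases List.mem_cons.mp hd with rfl | hd'
          · exact ⟨by simp, hc⟩
          · rcases ih l0 (by simp [h]) d hd' with ⟨h1, h2⟩
            exact ⟨by simp [h1], h2⟩
        · intro d hd
          rcases ih l (by simp [h, h']) d hd with ⟨h1, h2⟩
          exact ⟨by simp [h1], h2⟩

theorem pvLines_flatten (cs : List Char) :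
    (pvLines cs).foldr (fun l acc => l ++ '\n' :: acc) [] = cs ++ ['\n'] := by
  induction cs with
  | nil => simp [pvLines]
  | cons c rest ih =>
    simp only [pvLines]
    by_cases hc : c = '\n'
    · subst hc; simp [ih]
    · simp only [if_neg hc]
      cases h : pvLines rest with
      | nil => exact absurd h (pvLines_ne_nil rest)
      | cons l0 ls =>
        rw [h] at ih
        simp only [List.foldr_cons] at ih ⊢
        simp [← ih]

-- ---- B machine runs ----
theorem pvRun4 (l : List Char) (h : ('\n' : Char) ∉ l) (buf : List Char) (items : List String) :
    l.foldl pvBStep (4, buf, items) = (4, buf, items) := by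
  induction l with
  | nil => rfl
  | cons c t ih =>
    have hc : c ≠ '\n' := fun he => h (by simp [he])
    simp only [List.foldl_cons]
    have : pvBStep (4, buf, items) c = (4, buf, items) := by
      simp [pvBStep, hc]
    rw [this]
    exact ih (fun he => h (by simp [he]))

theorem pvRun3 (l : List Char) (h : ('\n' : Char) ∉ l) (buf : List Char) (items : List String) :
    l.foldl pvBStep (3, buf, items) = (3, buf ++ l, items) := by
  induction l generalizing buf with
  | nil => simp
  | cons c t ih =>
    have hc : c ≠ '\n' := fun he => h (by simp [he])
    simp only [List.foldl_cons]
    have : pvBStep (3, buf, items) c = (3, buf ++ [c], items) := by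
      simp [pvBStep, hc]
    rw [this, ih (fun he => h (by simp [he]))]
    simp

theorem pvRun2 (l : List Char) (h : ('\n' : Char) ∉ l) (buf : List Char) (items : List String) :
    l.foldl pvBStep (2, buf, items)
      = match l.dropWhile pvW with
        | [] => (2, buf, items)
        | c :: r => (3, c :: r, items) := by
  induction l with
  | nil => simp
  | cons c t ih =>
    have hc : c ≠ '\n' := fun he => h (by simp [he])
    have ht : ('\n' : Char) ∉ t := fun he => h (by simp [he])
    simp only [List.foldl_cons, List.dropWhile_cons]
    by_cases hw : pvW c = true
    · have hcond : c = ' ' ∨ c = '\t' ∨ c = '\r' := by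
        simp only [pvW, Bool.or_eq_true, decide_eq_true_eq] at hw
        tauto
      have hst : pvBStep (2, buf, items) c = (2, buf, items) := by
        simp [pvBStep, hc, hcond]
      rw [hst, ih ht]
      simp [hw]
    · have hcond : ¬ (c = ' ' ∨ c = '\t' ∨ c = '\r') := by
        simp only [pvW, Bool.or_eq_true, decide_eq_true_eq] at hw
        tauto
      have hst : pvBStep (2, buf, items) c = (3, [c], items) := by
        simp [pvBStep, hc, hcond]
      rw [hst, pvRun3 t ht [c] items]
      rw [Bool.not_eq_true] at hw
      simp [hw]

theorem pvRun0 (l : List Char) (h : ('\n' : Char) ∉ l) (buf : List Char) (items : List String) :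
    l.foldl pvBStep (0, buf, items) = (l.dropWhile pvW).foldl pvBStep (0, buf, items) := by
  induction l with
  | nil => rfl
  | cons c t ih =>
    have hc : c ≠ '\n' := fun he => h (by simp [he])
    have ht : ('\n' : Char) ∉ t := fun he => h (by simp [he])
    simp only [List.dropWhile_cons]
    by_cases hw : pvW c = true
    · have hcond : c = ' ' ∨ c = '\t' ∨ c = '\r' := by
        simp only [pvW, Bool.or_eq_true, decide_eq_true_eq] at hw
        tauto
      have hst : pvBStep (0, buf, items) c = (0, buf, items) := by
        simp [pvBStep, hc, hcond]
      rw [List.foldl_cons, hst, ih ht]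
      simp [hw]
    · rw [Bool.not_eq_true] at hw
      simp [hw]

theorem pvHeadDrop (l : List Char) (b : Char) (u : List Char)
    (hd : l.dropWhile pvW = b :: u) : pvW b = false := by
  have hne : l.dropWhile pvW ≠ [] := by simp [hd]
  have h2 := List.head_dropWhile_not pvW hne
  have h3 : (l.dropWhile pvW).head hne = b := by simp [hd]
  rwa [h3] at h2

theorem pvRunLine (l : List Char) (h : ('\n' : Char) ∉ l) (items : List String) :
    (l ++ ['\n']).foldl pvBStep (0, [], items) = (0, [], items ++ pvBContrib l) := by
  rw [List.foldl_append, pvRun0 l h [] items]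
  have hsub : ∀ c ∈ l.dropWhile pvW, c ∈ l :=
    fun c hc => (List.dropWhile_sublist pvW).subset hc
  unfold pvBContrib
  cases hd : l.dropWhile pvW with
  | nil => simp [pvBStep]
  | cons b u =>
    have hnu : ('\n' : Char) ∉ b :: u := fun hm => h (hsub _ (hd ▸ hm))
    have hb : b ≠ '\n' := fun he => hnu (by simp [he])
    have hu : ('\n' : Char) ∉ u := fun hm => hnu (by simp [hm])
    have hbw : pvW b = false := pvHeadDrop l b u hd
    have hnw : ¬ (b = ' ' ∨ b = '\t' ∨ b = '\r') := by
      simp only [pvW, Bool.or_eq_false_iff, decide_eq_false_iff_not] at hbw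
      tauto
    simp only [List.foldl_cons]
    by_cases hbul : b = '-' ∨ b = '*'
    · have hst : pvBStep (0, [], items) b = (1, [], items) := by
        simp [pvBStep, hb, hnw, hbul]
      rw [hst]
      cases u with
      | nil => simp [pvBStep, hbul]
      | cons x v =>
        have hx : x ≠ '\n' := fun he => hu (by simp [he])
        have hv : ('\n' : Char) ∉ v := fun hm => hu (by simp [hm])
        simp only [List.foldl_cons]
        by_cases hxs : x = ' '
        · subst hxs
          have hst2 : pvBStep (1, [], items) ' ' = (2, [], items) := by
            simp [pvBStep]
          rw [hst2, pvRun2 v hv [] items]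
          cases hdv : v.dropWhile pvW with
          | nil => simp [pvBStep, hbul]
          | cons c r => simp [pvBStep, hbul]
        · have hst2 : pvBStep (1, [], items) x = (4, [], items) := by
            simp [pvBStep, hx, hxs]
          rw [hst2, pvRun4 v hv [] items]
          simp [pvBStep, hbul, hxs]
    · have hst : pvBStep (0, [], items) b = (4, [], items) := by
        simp [pvBStep, hb, hnw, hbul]
      rw [hst, pvRun4 u hu [] items]
      simp [pvBStep, hbul]

theorem pvRunAll (lls : List (List Char)) (h : ∀ l ∈ lls, ('\n' : Char) ∉ l) (items : List String) :
    ((lls.foldr (fun l acc => l ++ '\n' :: acc) []).foldl pvBStep (0, [], items)).2.2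
      = items ++ lls.flatMap pvBContrib := by
  induction lls generalizing items with
  | nil => simp
  | cons l rest ih =>
    have hl : ('\n' : Char) ∉ l := h l (by simp)
    have hrest : ∀ l' ∈ rest, ('\n' : Char) ∉ l' := fun l' hm => h l' (by simp [hm])
    simp only [List.foldr_cons]
    have : l ++ '\n' :: rest.foldr (fun l acc => l ++ '\n' :: acc) []
        = (l ++ ['\n']) ++ rest.foldr (fun l acc => l ++ '\n' :: acc) [] := by simp
    rw [this, List.foldl_append, pvRunLine l hl items, ih hrest (items ++ pvBContrib l)]
    simp [List.flatMap_cons]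

theorem pvAltEq (content : String) :
    parse_list_items_py_alt content = (pvLines content.toList).flatMap pvBContrib := by
  unfold parse_list_items_py_alt
  rw [← pvLines_flatten content.toList,
    pvRunAll (pvLines content.toList)
      (fun l hl hm => (pvLines_mem content.toList l hl '\n' hm).2 rfl) []]
  simp

-- ---- A side ----
theorem pvALine_eq (items : List String) (s : String) :
    pvALine items s = items ++ pvAContrib s.toList := by
  unfold pvALine pvAContrib
  simp only []
  have h1 : PySem.Str.startswith (PySem.Str.strip s) "- "
      = PySem.Chars.startswith (PySem.Chars.strip s.toList) ['-', ' '] := by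
    rw [PySem.Str.startswith_eq, PySem.Str.toList_strip]; rfl
  have h2 : PySem.Str.startswith (PySem.Str.strip s) "* "
      = PySem.Chars.startswith (PySem.Chars.strip s.toList) ['*', ' '] := by
    rw [PySem.Str.startswith_eq, PySem.Str.toList_strip]; rfl
  have hitem : PySem.Str.strip (PySem.Str.slice (PySem.Str.strip s) (some 2) none)
      = String.ofList (PySem.Chars.strip (PySem.Chars.slice (PySem.Chars.strip s.toList) (some 2) none)) := by
    rw [← String.toList_inj, PySem.Str.toList_strip, PySem.Str.toList_slice,
      PySem.Str.toList_strip, String.toList_ofList]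
  rw [h1, h2, hitem]
  split
  · by_cases hL : PySem.Chars.strip (PySem.Chars.slice (PySem.Chars.strip s.toList) (some 2) none) = []
    · rw [hL]
      simp
    · have hns : String.ofList (PySem.Chars.strip (PySem.Chars.slice (PySem.Chars.strip s.toList) (some 2) none)) ≠ "" := by
        intro he
        apply hL
        rw [← String.toList_ofList
          (l := PySem.Chars.strip (PySem.Chars.slice (PySem.Chars.strip s.toList) (some 2) none)), he]
        rfl
      simp only [PySem.Chars.slice_eq_listSlice] at hL hns ⊢
      simp [hL, hns]
  · simp

theorem pvAEq (content : String) :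
    parse_list_items_py content = (pvLines content.toList).flatMap pvAContrib := by
  unfold parse_list_items_py
  rw [pvSplitOn_eq, List.foldl_map]
  have hf : (fun (acc : List String) (l : List Char) => pvALine acc (String.ofList l))
      = fun acc l => acc ++ pvAContrib l := by
    funext acc l
    rw [pvALine_eq, String.toList_ofList]
  rw [hf, PySem.List.foldl_append_eq_flatMap]
  simp

-- ---- per-line equivalence under Dom ----
theorem pvCharEq (c d : Char) (h : c.toNat = d.toNat) : c = d := by
  exact Char.ext (UInt32.toNat_inj.mp h)

theorem pvIsspace_eq (c : Char) (hd : pvDomChar c = true) (hn : c ≠ '\n') :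
    PySem.Chars.isspace c = pvW c := by
  have i32 : c = ' ' ↔ c.toNat = 32 := ⟨fun h => by subst h; rfl, fun h => pvCharEq c ' ' h⟩
  have i9 : c = '\t' ↔ c.toNat = 9 := ⟨fun h => by subst h; rfl, fun h => pvCharEq c '\t' h⟩
  have i13 : c = '\r' ↔ c.toNat = 13 := ⟨fun h => by subst h; rfl, fun h => pvCharEq c '\r' h⟩
  have hne10 : c.toNat ≠ 10 := fun h => hn (pvCharEq c '\n' h)
  simp only [pvDomChar, Bool.or_eq_true, Bool.and_eq_true, decide_eq_true_eq, beq_iff_eq] at hd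
  rw [Bool.eq_iff_iff]
  simp only [PySem.Chars.isspace, pvW, Bool.or_eq_true, Bool.and_eq_true, decide_eq_true_eq,
    i32, i9, i13]
  omega

theorem pvDropWhile_congr (p q : Char → Bool) (l : List Char) (h : ∀ c ∈ l, p c = q c) :
    l.dropWhile p = l.dropWhile q := by
  induction l with
  | nil => rfl
  | cons c t ih =>
    have hc := h c (by simp)
    simp only [List.dropWhile_cons, hc]
    split
    · exact ih fun d hd => h d (by simp [hd])
    · rfl

theorem pvRstrip_cons_not (b : Char) (u : List Char) (hb : pvW b = false) :
    pvRstrip (b :: u) = b :: pvRstrip u := by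
  unfold pvRstrip
  rw [List.reverse_cons, List.dropWhile_append]
  split
  · next he =>
      rw [List.isEmpty_iff, List.dropWhile_eq_nil_iff] at he
      have : u.reverse.dropWhile pvW = [] :=
        List.dropWhile_eq_nil_iff.mpr he
      simp [this, hb]
  · simp

theorem pvRstrip_cons_ws (b : Char) (u : List Char) (hb : pvW b = true) :
    pvRstrip (b :: u) = if pvRstrip u = [] then [] else b :: pvRstrip u := by
  unfold pvRstrip
  rw [List.reverse_cons, List.dropWhile_append]
  split
  · next he =>
      rw [List.isEmpty_iff] at he
      simp [he, hb]
  · next he =>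
      rw [List.isEmpty_iff] at he
      have : ¬ (u.reverse.dropWhile pvW).reverse = [] := by simpa using he
      simp [this]

theorem pvRstrip_nil_iff (l : List Char) : pvRstrip l = [] ↔ ∀ c ∈ l, pvW c = true := by
  unfold pvRstrip
  rw [List.reverse_eq_nil_iff, List.dropWhile_eq_nil_iff]
  constructor
  · intro h c hc; exact h c (by simp [hc])
  · intro h c hc; exact h c (List.mem_reverse.mp hc)

theorem pvRstrip_dropWhile (l : List Char) :
    pvRstrip (l.dropWhile pvW) = (pvRstrip l).dropWhile pvW := by
  induction l with
  | nil => simp [pvRstrip]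
  | cons c t ih =>
    by_cases hc : pvW c = true
    · rw [List.dropWhile_cons, if_pos hc, ih, pvRstrip_cons_ws c t hc]
      by_cases hrt : pvRstrip t = []
      · simp [hrt]
      · rw [if_neg hrt, List.dropWhile_cons, if_pos hc]
    · have hc' : pvW c = false := Bool.not_eq_true _ ▸ (by simpa using hc)
      rw [List.dropWhile_cons, if_neg (by simp [hc']), pvRstrip_cons_not c t hc',
        List.dropWhile_cons, if_neg (by simp [hc'])]

theorem pvRstrip_idem (l : List Char) : pvRstrip (pvRstrip l) = pvRstrip l := by
  unfold pvRstrip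
  rw [List.reverse_reverse, List.dropWhile_idempotent]

theorem pvChars_rstrip_eq (l : List Char) (h : ∀ c ∈ l, pvDomChar c = true ∧ c ≠ '\n') :
    PySem.Chars.rstrip l = pvRstrip l := by
  unfold PySem.Chars.rstrip pvRstrip
  rw [pvDropWhile_congr PySem.Chars.isspace pvW l.reverse
    (fun c hc => pvIsspace_eq c (h c (List.mem_reverse.mp hc)).1 (h c (List.mem_reverse.mp hc)).2)]

theorem pvChars_strip_eq (l : List Char) (h : ∀ c ∈ l, pvDomChar c = true ∧ c ≠ '\n') :
    PySem.Chars.strip l = pvRstrip (l.dropWhile pvW) := by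
  unfold PySem.Chars.strip PySem.Chars.lstrip
  rw [pvDropWhile_congr PySem.Chars.isspace pvW l (fun c hc => pvIsspace_eq c (h c hc).1 (h c hc).2)]
  exact pvChars_rstrip_eq (l.dropWhile pvW)
    (fun c hc => h c ((List.dropWhile_sublist pvW).subset hc))

theorem pvPerLine (l : List Char) (hd : ∀ c ∈ l, pvDomChar c = true) (hn : ('\n' : Char) ∉ l) :
    pvAContrib l = pvBContrib l := by
  have hdl : ∀ c ∈ l, pvDomChar c = true ∧ c ≠ '\n' :=
    fun c hc => ⟨hd c hc, fun he => hn (he ▸ hc)⟩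
  unfold pvAContrib pvBContrib
  simp only []
  rw [pvChars_strip_eq l hdl]
  cases hdw : l.dropWhile pvW with
  | nil => simp [pvRstrip, PySem.Chars.startswith]
  | cons b u =>
    have hmem : ∀ c ∈ b :: u, pvDomChar c = true ∧ c ≠ '\n' :=
      fun c hc => hdl c ((List.dropWhile_sublist pvW).subset (hdw ▸ hc))
    have hbw : pvW b = false := pvHeadDrop l b u hdw
    rw [pvRstrip_cons_not b u hbw]
    by_cases hbul : b = '-' ∨ b = '*'
    · cases u with
      | nil =>
        simp [pvRstrip, PySem.Chars.startswith, List.isPrefixOf, hbul]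
      | cons x v =>
        have hvmem : ∀ c ∈ v, pvDomChar c = true ∧ c ≠ '\n' :=
          fun c hc => hmem c (by simp [hc])
        by_cases hxs : x = ' '
        · subst hxs
          rw [pvRstrip_cons_ws ' ' v (by decide)]
          by_cases hrv : pvRstrip v = []
          · have hdv : v.dropWhile pvW = [] :=
              List.dropWhile_eq_nil_iff.mpr (pvRstrip_nil_iff v |>.mp hrv)
            rw [if_pos hrv]
            simp [PySem.Chars.startswith, List.isPrefixOf, hbul, hdv]
          · rw [if_neg hrv]
            have hcondA : (PySem.Chars.startswith (b :: ' ' :: pvRstrip v) ['-', ' ']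
                || PySem.Chars.startswith (b :: ' ' :: pvRstrip v) ['*', ' ']) = true := by
              rcases hbul with rfl | rfl <;> simp [PySem.Chars.startswith, List.isPrefixOf]
            rw [if_pos hcondA]
            have hslice : PySem.Chars.slice (b :: ' ' :: pvRstrip v) (some 2) none = pvRstrip v := by
              rw [PySem.Chars.slice_eq_listSlice, PySem.List.slice_from _ (by norm_num)]
              rfl
            rw [hslice]
            have hrvmem : ∀ c ∈ pvRstrip v, pvDomChar c = true ∧ c ≠ '\n' := by
              intro c hc
              apply hvmem
              unfold pvRstrip at hc
              have hc1 := List.mem_reverse.mp hc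
              exact List.mem_reverse.mp ((List.dropWhile_sublist pvW).subset hc1)
            rw [pvChars_strip_eq (pvRstrip v) hrvmem, ← pvRstrip_dropWhile, pvRstrip_idem]
            cases hdv : v.dropWhile pvW with
            | nil =>
              exact absurd (pvRstrip_nil_iff v |>.mpr (List.dropWhile_eq_nil_iff.mp hdv)) hrv
            | cons c r =>
              have hcw : pvW c = false := pvHeadDrop v c r hdv
              have hcr : ∀ d ∈ c :: r, pvDomChar d = true ∧ d ≠ '\n' :=
                fun d hd' => hvmem d ((List.dropWhile_sublist pvW).subset (hdv ▸ hd'))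
              rw [pvRstrip_cons_not c r hcw]
              have hB : PySem.Chars.rstrip (c :: r) = c :: pvRstrip r := by
                rw [pvChars_rstrip_eq (c :: r) hcr, pvRstrip_cons_not c r hcw]
              simp [hbul, hB, hdv]
        · have hrxv : pvRstrip (x :: v) = [] ∨ ∃ w, pvRstrip (x :: v) = x :: w := by
            by_cases hxw : pvW x = true
            · rw [pvRstrip_cons_ws x v hxw]
              split
              · exact Or.inl rfl
              · exact Or.inr ⟨pvRstrip v, rfl⟩
            · rw [pvRstrip_cons_not x v (by simpa using hxw)]
              exact Or.inr ⟨pvRstrip v, rfl⟩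
          have hx2 : ¬ (' ' = x) := fun h' => hxs h'.symm
          have hcondA : (PySem.Chars.startswith (b :: pvRstrip (x :: v)) ['-', ' ']
              || PySem.Chars.startswith (b :: pvRstrip (x :: v)) ['*', ' ']) = false := by
            rcases hrxv with he | ⟨w, he⟩ <;> rw [he] <;>
              simp [PySem.Chars.startswith, List.isPrefixOf, hx2]
          simp [hcondA, hbul, hxs]
    · have hnotd : b ≠ '-' := fun he => hbul (Or.inl he)
      have hnots : b ≠ '*' := fun he => hbul (Or.inr he)
      have hcondA : (PySem.Chars.startswith (b :: pvRstrip u) ['-', ' ']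
          || PySem.Chars.startswith (b :: pvRstrip u) ['*', ' ']) = false := by
        simp [PySem.Chars.startswith, List.isPrefixOf]
        exact ⟨fun h' => absurd h'.symm hnotd, fun h' => absurd h'.symm hnots⟩
      simp [hcondA, hbul]

-- ===== VERDICT (by name: the statement is the Claim_ definition above) =====
theorem parse_list_items_py_spec : Claim_equal_parse_list_items_py := by
  intro content hdom
  unfold Spec_parse_list_items_py
  rw [pvAEq, pvAltEq]
  unfold Dom_parse_list_items_py pvDomStr at hdom
  rw [List.all_eq_true] at hdom
  apply List.flatMap_congr
  intro l hl
  exact pvPerLine l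
    (fun c hc => hdom c (pvLines_mem content.toList l hl c hc).1)
    (fun hm => (pvLines_mem content.toList l hl '\n' hm).2 rfl)
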